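-- pv_equiv track=rewrite | github.com/NorthDice/AgentCLI | agentcli/core/intelligent_patcher.py | _find_import_section
-- ===== SOURCE A (Python) =====
-- from typing import List, Dict, Any, Optional, Tuple
--
-- def _find_import_section(lines: List[str]) -> Tuple[int, int]:
--     """Find the start and end of import section."""
--     import_start = -1
--     import_end = -1
--
--     for i, line in enumerate(lines):
--         stripped = line.strip()
--
--         # Skip comments and empty lines at the beginning
--         if not stripped or stripped.startswith('#') or stripped.startswith('"""') or stripped.startswith("'''"):
--             continue
--
--         # Found first import
--         if stripped.startswith('import ') or stripped.startswith('from '):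
--             if import_start == -1:
--                 import_start = i
--             import_end = i
--
--         # Stop at first non-import line (but allow empty lines between imports)
--         elif import_start >= 0 and stripped and not (stripped.startswith('import ') or stripped.startswith('from ')):
--             break
--
--     return import_start, import_end
-- ===== SOURCE B (Python) =====
-- def _kind(line):
--     """Classify a line: 0 = skippable (blank/comment/docstring opener), 1 = import, 2 = blocker."""
--     s = line.strip()
--     if not s or s.startswith(('#', '"""', "'''")):
--         return 0
--     if s.startswith(('import ', 'from ')):
--         return 1
--     return 2
--
--
-- def _find_import_section(lines):
--     """Find the start and end of import section (classify once, then pure index arithmetic)."""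
--     kinds = [_kind(l) for l in lines]
--     if 1 not in kinds:
--         return (-1, -1)
--     start = kinds.index(1)
--     tail = kinds[start:]
--     stop = tail.index(2) if 2 in tail else len(tail)
--     end = start + max((j for j in range(stop) if tail[j] == 1), default=0)
--     return (start, end)
-- ===== Notes on version B (the rewrite author's own statement) =====
-- stated objective: alternative
-- what changed: Replaces A's single stateful scan (import_start/import_end sentinels updated under a guarded break) with a classify-once pipeline: build a table of line kinds, then extract start with list.index, bound the section at the first blocker, and take the max import index in that window.
import Mathlib
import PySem

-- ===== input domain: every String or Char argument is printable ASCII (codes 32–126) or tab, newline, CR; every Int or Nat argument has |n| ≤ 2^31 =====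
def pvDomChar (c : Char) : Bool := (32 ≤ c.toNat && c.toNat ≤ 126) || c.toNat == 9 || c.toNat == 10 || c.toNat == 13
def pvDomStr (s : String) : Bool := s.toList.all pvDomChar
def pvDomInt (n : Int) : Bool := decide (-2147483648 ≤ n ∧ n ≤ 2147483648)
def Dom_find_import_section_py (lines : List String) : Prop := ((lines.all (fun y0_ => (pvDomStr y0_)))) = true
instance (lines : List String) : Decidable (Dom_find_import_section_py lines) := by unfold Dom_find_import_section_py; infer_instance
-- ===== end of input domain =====

-- B replaces A's single stateful scan (start/end sentinels with a guarded break) by a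
-- classify-once pipeline over a table of line kinds, extracting start and end by index
-- arithmetic (index / takewhile-bound / max); same cost, different algorithmic shape.

-- ===== PORT A =====
-- A's single for-loop over enumerate(lines) with mutable state (import_start, import_end), continue/break logic kept in order.
def goA : List String → Int → Int → Int → Int × Int
  | [], _, s, e => (s, e)
  | l :: rest, i, s, e =>
    let st := PySem.Str.strip l
    if st == "" || PySem.Str.startswith st "#" || PySem.Str.startswith st "\"\"\"" || PySem.Str.startswith st "'''" then
      goA rest (i + 1) s e
    else if PySem.Str.startswith st "import " || PySem.Str.startswith st "from " then
      goA rest (i + 1) (if s == -1 then i else s) i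
    else if decide (s ≥ 0) && !(st == "") && !(PySem.Str.startswith st "import " || PySem.Str.startswith st "from ") then
      (s, e)  -- break
    else
      goA rest (i + 1) s e

def find_import_section_py (lines : List String) : Int × Int :=
  goA lines 0 (-1) (-1)

-- ===== PORT B =====
-- B's _kind(line) classifier: 0 = skippable, 1 = import line, 2 = blocker
-- (startswith with a tuple ported as the disjunction of the startswith tests).
def kindB (line : String) : Int :=
  let s := PySem.Str.strip line
  if s == "" || PySem.Str.startswith s "#" || PySem.Str.startswith s "\"\"\"" || PySem.Str.startswith s "'''" then 0
  else if PySem.Str.startswith s "import " || PySem.Str.startswith s "from " then 1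
  else 2

-- B's pipeline: kinds table, membership test, kinds.index(1), slice kinds[start:] (start is a
-- valid index, so the slice is List.drop), tail.index(2) guarded by membership, and
-- max(..., default=0) over the filtered range (tail[j] with 0 ≤ j < len tail is List.getD, exact).
def find_import_section_py_alt (lines : List String) : Int × Int :=
  let kinds := lines.map kindB
  if !(kinds.contains 1) then (-1, -1)
  else
    let start := (PySem.List.index? kinds 1).getD 0  -- kinds.index(1); exact: guarded by the membership test
    let tail := kinds.drop start                     -- kinds[start:] with 0 ≤ start
    let stop := if tail.contains 2 then (PySem.List.index? tail 2).getD 0 else tail.length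
    let js := (List.range stop).filter (fun j => tail.getD j 0 == 1)
    let m := (PySem.List.max? js (fun y => y)).getD 0  -- max(..., default=0)
    ((start : Int), (start : Int) + (m : Int))

-- ===== PRECONDITION & SPEC =====
def Spec_find_import_section_py (lines : List String) (out : Int × Int) : Prop := out = find_import_section_py_alt lines
instance (lines : List String) (out : Int × Int) : Decidable (Spec_find_import_section_py lines out) := by unfold Spec_find_import_section_py; infer_instance

-- ===== CLAIM (what is proved, stated in full; the proofs are below) =====
def Claim_equal_find_import_section_py : Prop := ∀ (lines : List String), Dom_find_import_section_py lines → Spec_find_import_section_py lines (find_import_section_py lines)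

-- ===== LEMMAS AND PROOFS =====

-- Proof-only helpers: kind-level recursions mirroring A's two phases.
def extendK : List Int → Int → Int → Int
  | [], _, e => e
  | k :: rest, j, e =>
    if k == 1 then extendK rest (j + 1) j
    else if k == 2 then e
    else extendK rest (j + 1) e

def startK : List Int → Int → Int × Int
  | [], _ => (-1, -1)
  | k :: rest, i =>
    if k == 1 then (i, extendK rest (i + 1) i)
    else startK rest (i + 1)

-- relative last-import tracker: position p of next element, best b so far
def mrel : List Int → Nat → Nat → Nat
  | [], _, b => b
  | k :: rest, p, b =>
    if k == 1 then mrel rest (p + 1) p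
    else if k == 2 then b
    else mrel rest (p + 1) b

def stopOf (tk : List Int) : Nat :=
  if tk.contains 2 then (PySem.List.index? tk 2).getD 0 else tk.length

def selOf (tk : List Int) : List Nat :=
  (List.range (stopOf tk)).filter (fun j => tk.getD j 0 == 1)

theorem goA_phase2 (xs : List String) : ∀ (j s e : Int), 0 ≤ s →
    goA xs j s e = (s, extendK (xs.map kindB) j e) := by
  induction xs with
  | nil => intro j s e _; simp [goA, extendK]
  | cons l rest ih =>
    intro j s e hs
    have hsne : (s == -1) = false := by simp; omega
    by_cases h1 : (PySem.Str.strip l == "" || PySem.Str.startswith (PySem.Str.strip l) "#" || PySem.Str.startswith (PySem.Str.strip l) "\"\"\"" || PySem.Str.startswith (PySem.Str.strip l) "'''") = true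
    · have hk : kindB l = 0 := by simp only [kindB]; rw [if_pos h1]
      simp only [goA, List.map, extendK, hk]
      rw [if_pos h1]
      simpa using ih (j + 1) s e hs
    · by_cases h2 : (PySem.Str.startswith (PySem.Str.strip l) "import " || PySem.Str.startswith (PySem.Str.strip l) "from ") = true
      · have hk : kindB l = 1 := by simp only [kindB]; rw [if_neg h1, if_pos h2]
        simp only [goA, List.map, extendK, hk]
        rw [if_neg h1, if_pos h2, hsne]
        simpa using ih (j + 1) s j hs
      · have hk : kindB l = 2 := by simp only [kindB]; rw [if_neg h1, if_neg h2]
        have hne : (PySem.Str.strip l == "") = false := by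
          simp only [Bool.or_eq_true] at h1
          simpa using fun h => h1 (Or.inl (Or.inl (Or.inl h)))
        have hcond : (decide (s ≥ 0) && !(PySem.Str.strip l == "") &&
            !(PySem.Str.startswith (PySem.Str.strip l) "import " || PySem.Str.startswith (PySem.Str.strip l) "from ")) = true := by
          simp only [Bool.and_eq_true, Bool.not_eq_true', decide_eq_true_eq]
          exact ⟨⟨hs, hne⟩, by simpa using h2⟩
        simp only [goA, List.map, extendK, hk]
        rw [if_neg h1, if_neg h2, if_pos hcond]
        simp

theorem goA_phase1 (xs : List String) : ∀ (i : Int), 0 ≤ i →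
    goA xs i (-1) (-1) = startK (xs.map kindB) i := by
  induction xs with
  | nil => intro i _; simp [goA, startK]
  | cons l rest ih =>
    intro i hi
    by_cases h1 : (PySem.Str.strip l == "" || PySem.Str.startswith (PySem.Str.strip l) "#" || PySem.Str.startswith (PySem.Str.strip l) "\"\"\"" || PySem.Str.startswith (PySem.Str.strip l) "'''") = true
    · have hk : kindB l = 0 := by simp only [kindB]; rw [if_pos h1]
      simp only [goA, List.map, startK, hk]
      rw [if_pos h1]
      simpa using ih (i + 1) (by omega)
    · by_cases h2 : (PySem.Str.startswith (PySem.Str.strip l) "import " || PySem.Str.startswith (PySem.Str.strip l) "from ") = true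
      · have hk : kindB l = 1 := by simp only [kindB]; rw [if_neg h1, if_pos h2]
        simp only [goA, List.map, startK, hk]
        rw [if_neg h1, if_pos h2]
        simpa using goA_phase2 rest (i + 1) i i hi
      · have hk : kindB l = 2 := by simp only [kindB]; rw [if_neg h1, if_neg h2]
        simp only [goA, List.map, startK, hk]
        rw [if_neg h1, if_neg h2, if_neg (by simp)]
        simpa using ih (i + 1) (by omega)

theorem foldr_max_acc (M : List Nat) : ∀ b : Nat, M.foldr max b = max b (M.foldr max 0) := by
  induction M with
  | nil => intro b; simp
  | cons x t ih => intro b; simp [List.foldr, ih b]; omega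

theorem stopOf_cons_two (t : List Int) : stopOf (2 :: t) = 0 := by
  simp only [stopOf, List.contains_cons]
  rw [PySem.List.index?_cons_self]
  simp

theorem stopOf_cons_ne_two (k : Int) (t : List Int) (h : k ≠ 2) :
    stopOf (k :: t) = stopOf t + 1 := by
  simp only [stopOf, List.contains_cons]
  have h2k : ((2:Int) == k) = false := by simp; exact fun hh => h hh.symm
  rw [h2k]
  by_cases hc : t.contains 2 = true
  · rw [if_pos (by simpa using hc), if_pos hc]
    rcases (PySem.List.index?_isSome_iff t 2).2 (by simpa using hc) |> Option.isSome_iff_exists.1 with ⟨n, hn⟩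
    rw [PySem.List.index?_cons_of_ne t h, hn]; simp
  · rw [if_neg (by simpa using hc), if_neg hc]; simp

theorem selOf_cons_one (t : List Int) : selOf (1 :: t) = 0 :: (selOf t).map (· + 1) := by
  simp only [selOf, stopOf_cons_ne_two 1 t (by decide)]
  rw [List.range_succ_eq_map]
  simp [List.filter_map, Function.comp_def]

theorem selOf_cons_skip (k : Int) (t : List Int) (h1 : k ≠ 1) (h2 : k ≠ 2) :
    selOf (k :: t) = (selOf t).map (· + 1) := by
  simp only [selOf, stopOf_cons_ne_two k t h2]
  rw [List.range_succ_eq_map]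
  have hk : (k == 1) = false := by simpa using h1
  simp [List.filter_map, Function.comp_def, hk]

theorem map_add_shift (L : List Nat) (p : Nat) :
    L.map (fun x => x + 1 + p) = L.map (fun x => x + (p + 1)) := by
  apply List.map_congr_left; intro x _; omega

theorem mrel_eq_sel (r : List Int) : ∀ p b : Nat, b ≤ p →
    mrel r p b = ((selOf r).map (· + p)).foldr max b := by
  induction r with
  | nil => intro p b _; simp [mrel, selOf, stopOf]
  | cons k t ih =>
    intro p b hbp
    by_cases hk1 : k = 1
    · subst hk1
      rw [selOf_cons_one]
      simp only [mrel]
      rw [if_pos (by decide)]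
      rw [ih (p + 1) p (by omega)]
      simp only [List.map_cons, List.map_map, Function.comp_def, List.foldr]
      rw [map_add_shift]
      rw [foldr_max_acc _ b, foldr_max_acc _ p]
      omega
    · by_cases hk2 : k = 2
      · subst hk2
        have hsel : selOf ((2:Int) :: t) = [] := by
          simp [selOf, stopOf_cons_two]
        simp only [mrel, hsel]
        rw [if_neg (by decide), if_pos (by decide)]
        simp
      · rw [selOf_cons_skip k t hk1 hk2]
        simp only [mrel]
        rw [if_neg (by simpa using hk1), if_neg (by simpa using hk2)]
        rw [ih (p + 1) b (by omega)]
        simp only [List.map_map, Function.comp_def]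
        rw [map_add_shift]

theorem extendK_shift (r : List Int) : ∀ (c : Int) (p b : Nat),
    extendK r (c + p) (c + b) = c + mrel r p b := by
  induction r with
  | nil => intro c p b; simp [extendK, mrel]
  | cons k t ih =>
    intro c p b
    simp only [extendK, mrel]
    by_cases hk1 : (k == 1) = true
    · rw [if_pos hk1, if_pos hk1]
      have := ih c (p + 1) p
      push_cast at this ⊢
      rw [← this]; ring_nf
    · rw [if_neg hk1, if_neg hk1]
      by_cases hk2 : (k == 2) = true
      · rw [if_pos hk2, if_pos hk2]
      · rw [if_neg hk2, if_neg hk2]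
        have := ih c (p + 1) b
        push_cast at this ⊢
        rw [← this]; ring_nf

-- max? over a nonempty list with identity key is the running-max fold
theorem foldl_max_eq (t : List Nat) : ∀ x : Nat, t.foldl max x = max x (t.foldr max 0) := by
  induction t with
  | nil => intro x; simp
  | cons y s ih =>
    intro x
    simp only [List.foldl, List.foldr]
    rw [ih (max x y)]
    omega

theorem max?_getD_eq_foldr (L : List Nat) :
    (PySem.List.max? L (fun y => y)).getD 0 = L.foldr max 0 := by
  cases L with
  | nil => simp [PySem.List.max?]
  | cons x t =>
    rw [PySem.List.max?_id_cons]
    simp only [Option.getD_some, List.foldr]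
    rw [foldl_max_eq]

theorem startK_eq_pipeline (ks : List Int) : ∀ i : Int, 0 ≤ i →
    startK ks i = (match PySem.List.index? ks 1 with
      | none => (-1, -1)
      | some s => ((i + s : Int), (i + s : Int) + (((selOf (ks.drop s)).foldr max 0 : Nat) : Int))) := by
  induction ks with
  | nil => intro i _; simp [startK, PySem.List.index?, List.idxOf?]
  | cons k t ih =>
    intro i hi
    by_cases hk1 : (k == 1) = true
    · have hk : k = 1 := by simpa using hk1
      subst hk
      rw [PySem.List.index?_cons_self]
      simp only [startK, List.drop_zero]
      rw [if_pos (by decide)]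
      have h1 : extendK t (i + 1) i = i + mrel t 1 0 := by
        have := extendK_shift t i 1 0
        simpa using this
      rw [h1, mrel_eq_sel t 1 0 (by omega)]
      have hsel : (selOf ((1:Int) :: t)).foldr max 0 = max 0 (((selOf t).map (· + 1)).foldr max 0) := by
        rw [selOf_cons_one]
        simp [List.foldr]
      rw [hsel]
      simp
    · have hkne : k ≠ 1 := by simpa using hk1
      rw [PySem.List.index?_cons_of_ne t hkne]
      simp only [startK]
      rw [if_neg hk1]
      rw [ih (i + 1) (by omega)]
      cases h : PySem.List.index? t 1 with
      | none => simp
      | some s =>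
        simp only [Option.map_some]
        have hd : (k :: t).drop (s + 1) = t.drop s := by simp
        rw [hd]
        simp only [Prod.mk.injEq]
        constructor <;> (push_cast; ring)

-- ===== VERDICT (by name: the statement is the Claim_ definition above) =====
theorem find_import_section_py_spec : Claim_equal_find_import_section_py := by
  intro lines _
  unfold Spec_find_import_section_py find_import_section_py find_import_section_py_alt
  rw [goA_phase1 lines 0 le_rfl]
  set ks := lines.map kindB with hks
  rw [startK_eq_pipeline ks 0 le_rfl]
  by_cases hc : ks.contains 1 = true
  · rcases Option.isSome_iff_exists.1 ((PySem.List.index?_isSome_iff ks 1).2 ((List.contains_iff_mem).1 hc)) with ⟨s, hs⟩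
    rw [hs]
    rw [if_neg (show ¬((!ks.contains 1) = true) by rw [hc]; decide)]
    rw [hs]
    simp only [Option.getD_some]
    rw [max?_getD_eq_foldr]
    simp [selOf, stopOf]
  · have hnone : PySem.List.index? ks 1 = none := (PySem.List.index?_eq_none_iff ks 1).2 (fun hm => hc ((List.contains_iff_mem).2 hm))
    rw [hnone]
    rw [if_pos (show (!ks.contains 1) = true by cases h : ks.contains 1 with | false => decide | true => exact absurd h hc)]
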